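-- pv_equiv track=rewrite | github.com/justynroberts/Browser-incident-injector | scope_css.py | scope_css_selector
-- ===== SOURCE A (Python) =====
-- def scope_css_selector(selector):
--     """Add .incident-injector-panel prefix to selectors that don't have it"""
--     selector = selector.strip()
--
--     # Skip if already scoped
--     if selector.startswith('.incident-injector-panel'):
--         return selector
--
--     # Skip @ rules, keyframes, :root
--     if selector.startswith('@') or selector.startswith(':root'):
--         return selector
--
--     # Handle multiple selectors separated by comma
--     if ',' in selector:
--         parts = [scope_css_selector(p.strip()) for p in selector.split(',')]
--         return ', '.join(parts)
--
--     # Add prefix to regular selectors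
--     return f'.incident-injector-panel {selector}'
-- ===== SOURCE B (Python) =====
-- def scope_css_selector(selector):
--     """Add .incident-injector-panel prefix to selectors that don't have it"""
--     selector = selector.strip()
--
--     # Skip if already scoped, and skip @ rules / :root as a whole
--     if selector.startswith('.incident-injector-panel'):
--         return selector
--     if selector.startswith('@') or selector.startswith(':root'):
--         return selector
--
--     # One explicit loop over the comma-separated parts, base case inlined
--     if ',' in selector:
--         out = []
--         for p in selector.split(','):
--             q = p.strip()
--             if q.startswith('.incident-injector-panel') or q.startswith('@') or q.startswith(':root'):
--                 out.append(q)
--             else: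
--                 out.append('.incident-injector-panel ' + q)
--         return ', '.join(out)
--
--     return '.incident-injector-panel ' + selector
-- ===== Notes on version B (the rewrite author's own statement) =====
-- stated objective: simpler
-- what changed: Replaced A's self-recursion inside the comma-split comprehension with one explicit loop whose per-part base case (strip, guard, prefix) is inlined, so the function is non-recursive.
import Mathlib
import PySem

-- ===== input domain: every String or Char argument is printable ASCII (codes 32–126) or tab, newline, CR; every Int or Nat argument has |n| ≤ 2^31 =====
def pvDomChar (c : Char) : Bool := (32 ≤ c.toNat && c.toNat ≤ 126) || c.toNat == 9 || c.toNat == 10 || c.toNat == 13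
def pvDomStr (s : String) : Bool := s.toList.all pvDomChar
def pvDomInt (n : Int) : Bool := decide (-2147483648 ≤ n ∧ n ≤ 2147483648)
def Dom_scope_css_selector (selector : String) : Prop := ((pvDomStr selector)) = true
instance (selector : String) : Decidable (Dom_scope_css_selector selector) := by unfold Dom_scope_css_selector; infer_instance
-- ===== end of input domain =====

-- B replaces A's self-recursion in the comma branch by one explicit loop whose per-part
-- base case (strip, guard, prefix) is inlined, so B is non-recursive (objective: simpler).

-- ===== PORT A =====
-- A is self-recursive; the port carries a fuel counter (selector length + 1, always
-- sufficient: the recursion only descends on comma-free parts) purely to make it total.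
def scopeAChars : Nat → List Char → List Char
  | 0, sel0 => sel0  -- never reached (fuel is always sufficient)
  | fuel+1, sel0 =>
    let sel := PySem.Chars.strip sel0
    if PySem.Chars.startswith sel ".incident-injector-panel".toList then sel
    else if PySem.Chars.startswith sel "@".toList || PySem.Chars.startswith sel ":root".toList then sel
    else if PySem.Chars.isIn ",".toList sel then
      PySem.Chars.join ", ".toList
        ((PySem.Chars.splitOn sel ",".toList).map (fun p => scopeAChars fuel (PySem.Chars.strip p)))
    else ".incident-injector-panel ".toList ++ sel

def scope_css_selector (selector : String) : String :=
  String.ofList (scopeAChars (selector.toList.length + 1) selector.toList)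

-- ===== PORT B =====
-- inlined per-part transform of Source B's loop body
def scopeBPart (p : List Char) : List Char :=
  let q := PySem.Chars.strip p
  if PySem.Chars.startswith q ".incident-injector-panel".toList
     || PySem.Chars.startswith q "@".toList
     || PySem.Chars.startswith q ":root".toList then q
  else ".incident-injector-panel ".toList ++ q

def scopeBChars (sel0 : List Char) : List Char :=
  let sel := PySem.Chars.strip sel0
  if PySem.Chars.startswith sel ".incident-injector-panel".toList then sel
  else if PySem.Chars.startswith sel "@".toList || PySem.Chars.startswith sel ":root".toList then sel
  else if PySem.Chars.isIn ",".toList sel then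
    PySem.Chars.join ", ".toList
      ((PySem.Chars.splitOn sel ",".toList).foldl (fun out p => out ++ [scopeBPart p]) [])
  else ".incident-injector-panel ".toList ++ sel

def scope_css_selector_alt (selector : String) : String :=
  String.ofList (scopeBChars selector.toList)

-- ===== PRECONDITION & SPEC =====
def Spec_scope_css_selector (selector : String) (out : String) : Prop := out = scope_css_selector_alt selector
instance (selector : String) (out : String) : Decidable (Spec_scope_css_selector selector out) := by unfold Spec_scope_css_selector; infer_instance

-- ===== CLAIM (what is proved, stated in full; the proofs are below) =====
def Claim_equal_scope_css_selector : Prop := ∀ (selector : String), Dom_scope_css_selector selector → Spec_scope_css_selector selector (scope_css_selector selector)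

-- ===== LEMMAS AND PROOFS =====

theorem dropWhile_prefix_self (p : Char → Bool) (a b : List Char)
    (ha : List.dropWhile p a = a) (hpre : b <+: a) : List.dropWhile p b = b := by
  cases b with
  | nil => simp
  | cons x t =>
    rw [List.dropWhile_eq_self_iff] at ha ⊢
    intro h
    obtain ⟨s, hs⟩ := hpre
    subst hs
    simpa using ha (by simp)

theorem strip_idem (s : List Char) : PySem.Chars.strip (PySem.Chars.strip s) = PySem.Chars.strip s := by
  unfold PySem.Chars.strip PySem.Chars.rstrip PySem.Chars.lstrip
  set p := PySem.Chars.isspace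
  set a := List.dropWhile p s with ha
  have haa : List.dropWhile p a = a := List.dropWhile_idempotent p s
  have hpre : (List.dropWhile p a.reverse).reverse <+: a := by
    have h := (List.dropWhile_suffix (l := a.reverse) p).reverse
    simpa using h
  rw [dropWhile_prefix_self p a _ haa hpre]
  simp [List.dropWhile_idempotent]

theorem strip_sublist (s : List Char) : List.Sublist (PySem.Chars.strip s) s := by
  unfold PySem.Chars.strip PySem.Chars.rstrip PySem.Chars.lstrip
  have h1 : List.Sublist (List.dropWhile PySem.Chars.isspace (List.dropWhile PySem.Chars.isspace s).reverse)
      (List.dropWhile PySem.Chars.isspace s).reverse := List.dropWhile_sublist _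
  have h2 := h1.reverse
  simp at h2
  exact h2.trans (List.dropWhile_sublist _)

theorem splitOn_go_no_sep (c : Char) :
    ∀ (fuel : Nat) (l cur : List Char) (acc : List (List Char)),
      l.length < fuel → c ∉ cur → (∀ q ∈ acc, c ∉ q) →
      ∀ q ∈ PySem.Chars.splitOn.go [c] fuel l cur acc, c ∉ q := by
  intro fuel
  induction fuel with
  | zero => intro l cur acc h; omega
  | succ f ih =>
    intro l cur acc hlen hcur hacc q hq
    cases l with
    | nil =>
      unfold PySem.Chars.splitOn.go at hq
      simp at hq
      rcases hq with h | h
      · exact hacc q h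
      · subst h; simpa using hcur
    | cons x rest =>
      unfold PySem.Chars.splitOn.go at hq
      by_cases h : List.isPrefixOf [c] (x :: rest)
      · rw [if_pos h] at hq
        refine ih _ [] (cur.reverse :: acc) (by simp at hlen ⊢; omega) (by simp) ?_ q hq
        intro r hr
        rcases List.mem_cons.mp hr with h' | h'
        · subst h'; simpa using hcur
        · exact hacc r h'
      · rw [if_neg h] at hq
        have hx : x ≠ c := by
          intro h'; subst h'; simp [List.isPrefixOf] at h
        refine ih rest (x :: cur) acc (by simp at hlen ⊢; omega) ?_ hacc q hq
        intro h'
        rcases List.mem_cons.mp h' with h'' | h''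
        · exact hx h''.symm
        · exact hcur h''

theorem splitOn_no_sep (c : Char) (s : List Char) :
    ∀ q ∈ PySem.Chars.splitOn s [c], c ∉ q := by
  intro q hq
  unfold PySem.Chars.splitOn at hq
  exact splitOn_go_no_sep c (s.length + 1) s [] [] (by omega) (by simp) (by simp) q hq

theorem isIn_singleton_false (c : Char) (s : List Char) (h : c ∉ s) :
    PySem.Chars.isIn [c] s = false := by
  rw [PySem.Chars.isIn_eq_false_iff, List.singleton_infix_iff]; exact h

theorem part_eq (fuel : Nat) (p : List Char) (hp : ',' ∉ p) :
    scopeAChars (fuel + 1) (PySem.Chars.strip p) = scopeBPart p := by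
  have hq := strip_idem p
  have hmem : ',' ∉ PySem.Chars.strip p := fun hm => hp ((strip_sublist p).mem hm)
  have hcomma : PySem.Chars.isIn ",".toList (PySem.Chars.strip p) = false := by
    simpa using isIn_singleton_false ',' _ hmem
  simp only [scopeAChars, scopeBPart, hq, hcomma]
  split_ifs with h1 h2 h3 <;> simp_all

theorem chars_eq (s : List Char) : scopeAChars (s.length + 1) s = scopeBChars s := by
  simp only [scopeAChars, scopeBChars]
  split_ifs with h1 h2 h3
  · rfl
  · rfl
  · have hmem : ',' ∈ s := by
      have h' : ',' ∈ PySem.Chars.strip s := by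
        have hinf := (PySem.Chars.isIn_iff_infix _ _).mp (by simpa using h3)
        simpa using (List.singleton_infix_iff _ _).mp (by simpa using hinf)
      exact (strip_sublist s).mem h'
    obtain ⟨m, hm⟩ : ∃ m, s.length = m + 1 := by
      cases s with
      | nil => simp at hmem
      | cons a t => exact ⟨t.length, by simp⟩
    rw [PySem.List.foldl_append_singleton_eq_map]
    apply congrArg
    apply List.map_congr_left
    intro p hpmem
    have hp : ',' ∉ p := splitOn_no_sep ',' (PySem.Chars.strip s) p (by simpa using hpmem)
    rw [hm]; exact part_eq m p hp
  · rfl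

-- ===== VERDICT (by name: the statement is the Claim_ definition above) =====
theorem scope_css_selector_spec : Claim_equal_scope_css_selector := by
  intro selector _
  unfold Spec_scope_css_selector scope_css_selector scope_css_selector_alt
  rw [chars_eq]
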